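-- pv_equiv track=rewrite | github.com/hartmaj2/plat-arch-solids-coloring | Code/coloring_plots.py | get_classified_fpritned_clrings
-- ===== SOURCE A (Python) =====
-- def get_fingerprint(fingerprinted_coloring: tuple[list,list]) -> list:
--     return fingerprinted_coloring[1]
--
-- def get_sizes_vector(fingerprint : list[tuple]) -> tuple:
--     return tuple([size for (size,clr) in fingerprint])
--
-- def get_classified_fpritned_clrings(fingerprinted_colorings : list[tuple[list,list]]) -> dict[tuple,list]:
--     fingerprint_dict : dict[tuple,list] = {}
--     for fprinted_clring in fingerprinted_colorings:
--         sizes_vect = get_sizes_vector(get_fingerprint(fprinted_clring))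
--         if sizes_vect not in fingerprint_dict: # initialize the list for this key if not encountered yet
--             fingerprint_dict[sizes_vect] = []
--         fingerprint_dict[sizes_vect].append(fprinted_clring)
--     return fingerprint_dict
-- ===== SOURCE B (Python) =====
-- def get_classified_fpritned_clrings(fingerprinted_colorings):
--     # Alternative decomposition: collect the distinct keys first (in first-occurrence
--     # order), then build each group with one filter pass per key.
--     def key(fc):
--         return tuple(size for size, _clr in fc[1])
--     keys = list(dict.fromkeys(key(fc) for fc in fingerprinted_colorings))
--     return {k: [fc for fc in fingerprinted_colorings if key(fc) == k] for k in keys}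
-- ===== Notes on version B (the rewrite author's own statement) =====
-- stated objective: alternative
-- what changed: A builds the groups in one pass by mutating a dict entry per element; B first deduplicates the key sequence to get the distinct keys in first-occurrence order and then builds each group by filtering the input once per key, in a dict comprehension.
import Mathlib
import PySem

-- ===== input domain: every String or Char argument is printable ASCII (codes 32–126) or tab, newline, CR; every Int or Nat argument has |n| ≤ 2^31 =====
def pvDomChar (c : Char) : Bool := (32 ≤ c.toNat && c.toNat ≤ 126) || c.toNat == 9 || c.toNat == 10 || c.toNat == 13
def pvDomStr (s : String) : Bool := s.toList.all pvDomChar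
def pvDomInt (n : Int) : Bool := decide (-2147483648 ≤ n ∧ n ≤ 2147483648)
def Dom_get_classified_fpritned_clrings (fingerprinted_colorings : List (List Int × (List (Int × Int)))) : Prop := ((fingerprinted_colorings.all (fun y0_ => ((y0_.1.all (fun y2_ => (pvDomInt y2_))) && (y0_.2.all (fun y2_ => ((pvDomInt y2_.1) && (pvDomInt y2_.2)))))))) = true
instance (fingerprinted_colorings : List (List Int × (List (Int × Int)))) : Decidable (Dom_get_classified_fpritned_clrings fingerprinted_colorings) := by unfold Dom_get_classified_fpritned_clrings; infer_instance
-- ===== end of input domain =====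

-- ===== PORT A =====
-- A: one pass; for each coloring, initialize the key's list if absent, then append.
-- B: dedup the key sequence, then one filter pass per distinct key. Same value; alternative decomposition, not faster.
def get_fingerprint (fingerprinted_coloring : List Int × (List (Int × Int))) : List (Int × Int) :=
  fingerprinted_coloring.2

def get_sizes_vector (fingerprint : List (Int × Int)) : List Int :=
  fingerprint.map (fun p => p.1)

def get_classified_fpritned_clrings (fingerprinted_colorings : List (List Int × (List (Int × Int)))) : List (List Int × List (List Int × (List (Int × Int)))) :=
  (fingerprinted_colorings.foldl
    (fun fingerprint_dict fprinted_clring =>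
      let sizes_vect := get_sizes_vector (get_fingerprint fprinted_clring)
      let fingerprint_dict :=
        if fingerprint_dict.contains sizes_vect then fingerprint_dict
        else fingerprint_dict.insert sizes_vect []
      fingerprint_dict.modify sizes_vect [] (fun l => l ++ [fprinted_clring]))
    PySem.Dict.empty).items

-- ===== PORT B =====
def pvKeyB (fc : List Int × (List (Int × Int))) : List Int :=
  fc.2.map (fun p => p.1)

def get_classified_fpritned_clrings_alt (fingerprinted_colorings : List (List Int × (List (Int × Int)))) : List (List Int × List (List Int × (List (Int × Int)))) :=
  (PySem.List.dedup (fingerprinted_colorings.map pvKeyB)).map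
    (fun k => (k, fingerprinted_colorings.filter (fun fc => pvKeyB fc == k)))

-- ===== PRECONDITION & SPEC =====
def Spec_get_classified_fpritned_clrings (fingerprinted_colorings : List (List Int × (List (Int × Int)))) (out : List (List Int × List (List Int × (List (Int × Int))))) : Prop := out = get_classified_fpritned_clrings_alt fingerprinted_colorings
instance (fingerprinted_colorings : List (List Int × (List (Int × Int)))) (out : List (List Int × List (List Int × (List (Int × Int))))) : Decidable (Spec_get_classified_fpritned_clrings fingerprinted_colorings out) := by unfold Spec_get_classified_fpritned_clrings; infer_instance

-- ===== CLAIM (what is proved, stated in full; the proofs are below) =====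
def Claim_equal_get_classified_fpritned_clrings : Prop := ∀ (fingerprinted_colorings : List (List Int × (List (Int × Int)))), Dom_get_classified_fpritned_clrings fingerprinted_colorings → Spec_get_classified_fpritned_clrings fingerprinted_colorings (get_classified_fpritned_clrings fingerprinted_colorings)

-- ===== LEMMAS AND PROOFS =====

-- A's "initialize the list if absent, then append" step is one modify-with-default step.
lemma pv_step_eq {κ ν : Type} [BEq κ] [LawfulBEq κ] (d : PySem.Dict κ ν) (k : κ) (f : ν → ν) (v : ν) :
    (if d.contains k then d else d.insert k v).modify k v f = d.modify k v f := by
  by_cases h : d.contains k = true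
  · simp [h]
  · have hnone : d.get? k = none := by
      rw [PySem.Dict.get?_eq_none_iff_contains]; simpa using h
    simp [h, PySem.Dict.modify, PySem.Dict.getD, hnone, PySem.Dict.get?_insert_self,
      PySem.Dict.insert_insert_self]

-- A's whole loop is the plain group-by fold.
lemma pv_foldA (xs : List (List Int × (List (Int × Int)))) :
    (xs.foldl
      (fun fingerprint_dict fprinted_clring =>
        let sizes_vect := get_sizes_vector (get_fingerprint fprinted_clring)
        let fingerprint_dict :=
          if fingerprint_dict.contains sizes_vect then fingerprint_dict
          else fingerprint_dict.insert sizes_vect []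
        fingerprint_dict.modify sizes_vect [] (fun l => l ++ [fprinted_clring]))
      PySem.Dict.empty) =
    (xs.foldl (fun d x => d.modify (pvKeyB x) [] (fun l => l ++ [x])) PySem.Dict.empty) := by
  have hfun : (fun (d : PySem.Dict (List Int) (List (List Int × (List (Int × Int))))) x =>
        let sizes_vect := get_sizes_vector (get_fingerprint x)
        let d' := if d.contains sizes_vect then d else d.insert sizes_vect []
        d'.modify sizes_vect [] (fun l => l ++ [x])) =
      (fun d x => d.modify (pvKeyB x) [] (fun l => l ++ [x])) := by
    funext d x
    exact pv_step_eq d (pvKeyB x) (fun l => l ++ [x]) []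
  rw [hfun]

-- Every lookup in the group-by fold's result is a filter of the input.
lemma pv_getD (xs : List (List Int × (List (Int × Int)))) (k : List Int) :
    (xs.foldl (fun d x => d.modify (pvKeyB x) [] (fun l => l ++ [x])) PySem.Dict.empty).getD k [] =
    xs.filter (fun fc => pvKeyB fc == k) := by
  have h := PySem.Dict.getD_foldl_modify_append (xs.map (fun x => (pvKeyB x, x)))
    (PySem.Dict.empty) k
  rw [List.foldl_map] at h
  simp only [List.filter_map, Function.comp_def] at h
  simpa [PySem.Dict.getD, PySem.Dict.get?, PySem.Dict.empty, Function.comp_def] using h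

-- ===== VERDICT (by name: the statement is the Claim_ definition above) =====
theorem get_classified_fpritned_clrings_spec : Claim_equal_get_classified_fpritned_clrings := by
  intro xs _
  unfold Spec_get_classified_fpritned_clrings get_classified_fpritned_clrings
    get_classified_fpritned_clrings_alt
  rw [pv_foldA]
  have hnd : (xs.foldl (fun d x => d.modify (pvKeyB x) [] (fun l => l ++ [x]))
      PySem.Dict.empty).keys.Nodup :=
    PySem.Dict.nodup_keys_foldl_modify_key xs pvKeyB [] (fun _ x => fun l => l ++ [x])
      PySem.Dict.empty (by simp [PySem.Dict.keys_empty])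
  rw [PySem.Dict.items_eq_map_keys _ hnd []]
  rw [PySem.Dict.keys_foldl_modify_key xs pvKeyB [] (fun _ x => fun l => l ++ [x])]
  rw [PySem.List.dedup_eq_ofList]
  simp only [PySem.Dict.keys_empty, PySem.Set.update_nil_left]
  exact List.map_congr_left (fun k _ => by rw [pv_getD])
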